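-- pv_equiv track=rewrite | github.com/ezmiller-su/ai-resume-builder | build_resume_from_json.py | _balance_contact_lines
-- ===== SOURCE A (Python) =====
-- _SEP = " \u00b7 "
--
-- _MAX_LINE_CHARS = 80
--
-- def _balance_contact_lines(items):
--     """Return 1 or 2 joined strings, splitting only if a single line overflows."""
--     if not items:
--         return []
--     # Flatten if wrapped in an outer list: [["a","b","c"]] → ["a","b","c"]
--     if items and isinstance(items[0], list):
--         items = [x for sub in items for x in sub]
--     single = _SEP.join(items)
--     if len(single) <= _MAX_LINE_CHARS:
--         return [single]
--     # Split as evenly as possible across two lines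
--     best_split, best_diff = 1, float("inf")
--     for i in range(1, len(items)):
--         a = _SEP.join(items[:i])
--         b = _SEP.join(items[i:])
--         diff = abs(len(a) - len(b))
--         if diff < best_diff:
--             best_diff = diff
--             best_split = i
--     return [_SEP.join(items[:best_split]), _SEP.join(items[best_split:])]
-- ===== SOURCE B (Python) =====
-- _SEP = " \u00b7 "
--
-- _MAX_LINE_CHARS = 80
--
-- def _balance_contact_lines(items):
--     """Return 1 or 2 joined strings, splitting only if a single line overflows."""
--     if not items:
--         return []
--     # Flatten if wrapped in an outer list: [["a","b","c"]] -> ["a","b","c"]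
--     if items and isinstance(items[0], list):
--         items = [x for sub in items for x in sub]
--     n = len(items)
--     total = sum(len(x) for x in items) + len(_SEP) * (n - 1)
--     if total <= _MAX_LINE_CHARS:
--         return [_SEP.join(items)]
--     # The left-half length grows strictly with the split point, so |left-right|
--     # is V-shaped: walk to the first split whose left half reaches half the
--     # text (early exit), then pick the better of that split and the one before.
--     S = total - len(_SEP)          # left(j) + right(j) for every split j
--     left = len(items[0])
--     j = 1
--     while j < n - 1 and 2 * left < S:
--         left += len(_SEP) + len(items[j])
--         j += 1
--     if j > 1:
--         prev_left = left - len(_SEP) - len(items[j - 1])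
--         if abs(2 * prev_left - S) <= abs(2 * left - S):
--             j -= 1
--     return [_SEP.join(items[:j]), _SEP.join(items[j:])]
-- ===== Notes on version B (the rewrite author's own statement) =====
-- stated objective: faster
-- what changed: Replaces the O(n^2) loop that re-joins both halves at every split point with an O(n) early-exit walk over running item lengths to the first split whose left half reaches half the text (the balance function is V-shaped in the split point), then picks the better of that split and the previous one.
import Mathlib
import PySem

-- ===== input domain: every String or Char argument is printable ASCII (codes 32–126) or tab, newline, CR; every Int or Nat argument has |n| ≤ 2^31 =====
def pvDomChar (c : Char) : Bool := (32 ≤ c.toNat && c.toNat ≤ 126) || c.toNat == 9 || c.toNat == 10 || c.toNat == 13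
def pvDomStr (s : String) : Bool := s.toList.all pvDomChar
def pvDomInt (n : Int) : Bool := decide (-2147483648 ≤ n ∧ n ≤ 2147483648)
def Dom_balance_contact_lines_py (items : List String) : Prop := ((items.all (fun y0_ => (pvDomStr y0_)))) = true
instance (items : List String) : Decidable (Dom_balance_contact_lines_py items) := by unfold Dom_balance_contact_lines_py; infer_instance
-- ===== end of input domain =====

-- ===== PORT A =====
-- B replaces A's quadratic best-diff scan (re-joining both halves at every split
-- point) with a linear early-exit walk to the first split whose left half reaches
-- half the text, then a choice between that split and the previous one (faster).
-- Note: A's 'isinstance(items[0], list)' flatten branch is unreachable for the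
-- declared input type List String, so it has no counterpart in either port.
def pvSEP : String := " · "

def pvStepA (items : List String) (st : Int × Option Int) (i : Int) : Int × Option Int :=
  let a := PySem.Str.join pvSEP (PySem.List.slice items none (some i))
  let b := PySem.Str.join pvSEP (PySem.List.slice items (some i) none)
  let diff : Int := |PySem.Str.len a - PySem.Str.len b|
  match st.2 with
  | none => (i, some diff)          -- best_diff = float('inf'): 'diff < inf' always holds
  | some bd => if diff < bd then (i, some diff) else st

def balance_contact_lines_py (items : List String) : List String :=
  if items = [] then []
  else
    let single := PySem.Str.join pvSEP items
    if PySem.Str.len single ≤ 80 then [single]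
    else
      let st := (PySem.List.pyRange 1 (items.length : Int) 1).foldl (pvStepA items) (1, none)
      [PySem.Str.join pvSEP (PySem.List.slice items none (some st.1)),
       PySem.Str.join pvSEP (PySem.List.slice items (some st.1) none)]

-- ===== PORT B =====
-- the 'while j < n - 1 and 2 * left < S' loop of Source B; fuel only makes the
-- recursion structural (the call site passes enough fuel for full execution)
def pvWhileB (lens : List Int) (S n : Int) : Nat → Int → Int → Int × Int
  | 0, j, left => (j, left)
  | fuel + 1, j, left =>
    if j < n - 1 ∧ 2 * left < S then
      pvWhileB lens S n fuel (j + 1) (left + 3 + PySem.List.pyGetD lens j 0)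
    else (j, left)

def balance_contact_lines_py_alt (items : List String) : List String :=
  if items = [] then []
  else
    let n : Int := items.length
    let lens := items.map PySem.Str.len
    let total := lens.sum + 3 * (n - 1)
    if total ≤ 80 then [PySem.Str.join pvSEP items]
    else
      let S := total - 3
      let r := pvWhileB lens S n items.length 1 (PySem.List.pyGetD lens 0 0)
      let j :=
        if 1 < r.1 then
          let prevLeft := r.2 - 3 - PySem.List.pyGetD lens (r.1 - 1) 0
          if |2 * prevLeft - S| ≤ |2 * r.2 - S| then r.1 - 1 else r.1
        else r.1
      [PySem.Str.join pvSEP (PySem.List.slice items none (some j)),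
       PySem.Str.join pvSEP (PySem.List.slice items (some j) none)]

-- ===== PRECONDITION & SPEC =====
def Spec_balance_contact_lines_py (items : List String) (out : List String) : Prop := out = balance_contact_lines_py_alt items
instance (items : List String) (out : List String) : Decidable (Spec_balance_contact_lines_py items out) := by unfold Spec_balance_contact_lines_py; infer_instance

-- ===== CLAIM (what is proved, stated in full; the proofs are below) =====
def Claim_equal_balance_contact_lines_py : Prop := ∀ (items : List String), Dom_balance_contact_lines_py items → Spec_balance_contact_lines_py items (balance_contact_lines_py items)

-- ===== LEMMAS AND PROOFS =====

-- length of ' · '.join(items[:j]) as a function of the item lengths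
def pvLeft (lens : List Int) (j : Int) : Int :=
  if j ≤ 0 then 0 else (lens.take j.toNat).sum + 3 * (j - 1)

def pvLens (items : List String) : List Int := items.map PySem.Str.len

def pvS (items : List String) : Int :=
  (pvLens items).sum + 3 * ((items.length : Int) - 1) - 3

def pvDiff (items : List String) (k : Int) : Int :=
  |2 * pvLeft (pvLens items) k - pvS items|

-- length of sep.join(x :: t) on the List Char level
theorem pv_interLen (sep : List Char) (x : List Char) (t : List (List Char)) :
    (sep.intercalate (x :: t)).length
      = ((x :: t).map List.length).sum + sep.length * t.length := by
  induction t generalizing x with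
  | nil => simp [List.intercalate]
  | cons y t ih =>
    have h : sep.intercalate (x :: y :: t) = x ++ sep ++ sep.intercalate (y :: t) := by
      simp [List.intercalate, List.intersperse]
    rw [h]
    simp only [List.length_append, ih y]
    simp [List.map_cons, List.sum_cons]
    ring

-- length of the Python join ' · '.join(l) for nonempty l, in Int form
theorem pv_joinLen (l : List String) (h : l ≠ []) :
    PySem.Str.len (PySem.Str.join pvSEP l)
      = (l.map PySem.Str.len).sum + 3 * ((l.length : Int) - 1) := by
  obtain ⟨x, t, rfl⟩ := List.exists_cons_of_ne_nil h
  simp only [PySem.Str.len, PySem.Str.join, PySem.Chars.join]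
  rw [show (List.map String.toList (x :: t)) = x.toList :: t.map String.toList from rfl]
  rw [show (String.ofList (pvSEP.toList.intercalate (x.toList :: t.map String.toList))).toList = pvSEP.toList.intercalate (x.toList :: t.map String.toList) by simp]
  rw [pv_interLen]
  push_cast
  simp [Function.comp_def, PySem.Str.len_eq, pvSEP]
  congr 1

theorem pv_lenTake (items : List String) (k : Int) (h1 : 1 ≤ k) (h2 : k ≤ (items.length : Int)) :
    PySem.Str.len (PySem.Str.join pvSEP (PySem.List.slice items none (some k)))
      = pvLeft (items.map PySem.Str.len) k := by
  rw [PySem.List.slice_to items (by omega)]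
  rw [pv_joinLen _ (by
    intro hnil
    have hl : (items.take k.toNat).length = 0 := by rw [hnil]; rfl
    rw [List.length_take] at hl
    omega)]
  rw [pvLeft, if_neg (by omega)]
  rw [← List.map_take]
  congr 1
  have : (items.take k.toNat).length = k.toNat := by
    simp [List.length_take]; omega
  rw [this]
  omega

theorem pv_lenDrop (items : List String) (k : Int) (h1 : 1 ≤ k) (h2 : k < (items.length : Int)) :
    PySem.Str.len (PySem.Str.join pvSEP (PySem.List.slice items (some k) none))
      = ((items.map PySem.Str.len).sum + 3 * ((items.length : Int) - 1))
          - pvLeft (items.map PySem.Str.len) k - 3 := by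
  rw [PySem.List.slice_from items (by omega)]
  rw [pv_joinLen _ (by
    intro hnil
    have hl : (items.drop k.toNat).length = 0 := by rw [hnil]; rfl
    rw [List.length_drop] at hl
    omega)]
  rw [pvLeft, if_neg (by omega)]
  have hlen : ((items.drop k.toNat).length : Int) = (items.length : Int) - k := by
    simp [List.length_drop]; omega
  rw [hlen, List.map_drop]
  have hsum : ((items.map PySem.Str.len).take k.toNat).sum
      + ((items.map PySem.Str.len).drop k.toNat).sum = (items.map PySem.Str.len).sum := by
    rw [← List.sum_append, List.take_append_drop]
  omega

theorem pv_left_step (lens : List Int) (k : Int) (h1 : 1 ≤ k) (h2 : k < (lens.length : Int)) :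
    pvLeft lens (k - 1) + (if 1 < k then 3 else 0) + PySem.List.pyGetD lens (k - 1) 0
      = pvLeft lens k := by
  have hget : PySem.List.pyGetD lens (k - 1) 0 = lens.getD (k - 1).toNat 0 := by
    rw [PySem.List.pyGetD_of_nonneg _ _ (by omega)]
  have hidx : (k - 1).toNat < lens.length := by omega
  have hgd : lens.getD (k - 1).toNat 0 = lens[(k - 1).toNat] := List.getD_eq_getElem _ _ hidx
  have htake : (lens.take ((k - 1).toNat + 1)).sum = (lens.take (k - 1).toNat).sum + lens[(k - 1).toNat] :=
    List.sum_take_succ _ _ hidx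
  have hk : k.toNat = (k - 1).toNat + 1 := by omega
  rw [hget, hgd]
  by_cases h : 1 < k
  · simp only [pvLeft, if_neg (show ¬(k - 1 ≤ 0) by omega), if_neg (show ¬(k ≤ 0) by omega),
      if_pos h]
    rw [hk, htake]
    ring
  · have hk1 : k = 1 := by omega
    subst hk1
    simp only [pvLeft]
    norm_num
    have h0 : lens[(0 : Nat)]'(by omega) = (List.take 1 lens).sum := by simpa using htake.symm
    simpa using h0

-- entries of items.map len are nonnegative, hence so is any pyGetD with default 0
theorem pv_getD_nonneg (items : List String) (i : Int) :
    0 ≤ PySem.List.pyGetD (items.map PySem.Str.len) i 0 := by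
  have hmem : ∀ x ∈ items.map PySem.Str.len, (0:Int) ≤ x := by
    intro x hx
    obtain ⟨s, _, rfl⟩ := List.mem_map.1 hx
    simp [PySem.Str.len_eq]
  cases hg : PySem.List.pyGet? (items.map PySem.Str.len) i with
  | none => rw [PySem.List.pyGetD_of_none _ _ _ hg]
  | some v =>
    have : PySem.List.pyGetD (items.map PySem.Str.len) i 0 = v := by
      simp [PySem.List.pyGetD, hg]
    rw [this]
    have hv : v ∈ items.map PySem.Str.len := by
      exact PySem.List.mem_of_pyGet?_eq_some (h := hg)
    exact hmem v hv

-- pvLeft grows by at least 3 per extra item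
theorem pv_left_mono (items : List String) (i j : Int) (h1 : 1 ≤ i) (hij : i ≤ j)
    (hj : j < (items.length : Int)) :
    pvLeft (items.map PySem.Str.len) i + 3 * (j - i) ≤ pvLeft (items.map PySem.Str.len) j := by
  have hlen : ((items.map PySem.Str.len).length : Int) = (items.length : Int) := by simp
  obtain ⟨c, hc⟩ : ∃ c : Nat, j - i = c := ⟨(j - i).toNat, by omega⟩
  induction c generalizing j with
  | zero =>
    have hji : j = i := by omega
    rw [hji]
    omega
  | succ c ih =>
    have hji : i ≤ j - 1 := by omega
    have hstep := pv_left_step (items.map PySem.Str.len) j (by omega) (by omega)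
    have hge := pv_getD_nonneg items (j - 1)
    have hif : (if 1 < j then (3:Int) else 0) = 3 := if_pos (by omega)
    rw [hif] at hstep
    have := ih (j - 1) hji (by omega) (by omega)
    omega

-- one A-step, rewritten through the length formulas (1 ≤ k < n)
theorem pv_stepA_eq (items : List String) (k : Int) (st : Int × Option Int)
    (h1 : 1 ≤ k) (h2 : k < (items.length : Int)) :
    pvStepA items st k
      = match st.2 with
        | none => (k, some (pvDiff items k))
        | some bd => if pvDiff items k < bd then (k, some (pvDiff items k)) else st := by
  have ha := pv_lenTake items k h1 (by omega)
  have hb := pv_lenDrop items k h1 h2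
  simp only [pvStepA, ha, hb]
  have : pvLeft (items.map PySem.Str.len) k
      - ((items.map PySem.Str.len).sum + 3 * ((items.length : Int) - 1)
          - pvLeft (items.map PySem.Str.len) k - 3)
      = 2 * pvLeft (pvLens items) k - pvS items := by
    simp only [pvLens, pvS]; ring
  rw [this]
  rfl

-- flat phase: past m nothing improves strictly, the state stays (m, |f m|)
theorem pv_foldA_flat (items : List String) (m : Int) (hm : 1 ≤ m)
    (hflat : ∀ i, m < i → i < (items.length : Int) → pvDiff items m ≤ pvDiff items i) :
    ∀ (c : Nat) (k : Int), m < k → ((items.length : Int) - k).toNat = c →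
    (PySem.List.pyRange k (items.length : Int) 1).foldl (pvStepA items) (m, some (pvDiff items m))
      = (m, some (pvDiff items m)) := by
  intro c
  induction c with
  | zero =>
    intro k hk hc
    rw [PySem.List.pyRange_one_eq_nil (by omega)]
    rfl
  | succ c ih =>
    intro k hk hc
    have hkN : k < (items.length : Int) := by omega
    rw [PySem.List.pyRange_one_cons hkN, List.foldl_cons]
    rw [pv_stepA_eq items k _ (by omega) hkN]
    simp only
    rw [if_neg (by have := hflat k hk hkN; omega)]
    exact ih (k + 1) (by omega) (by omega)

-- descending phase: each step up to m strictly improves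
theorem pv_foldA_desc (items : List String) (m : Int) (hm1 : 1 ≤ m)
    (hm2 : m < (items.length : Int))
    (hdec : ∀ i, 2 ≤ i → i ≤ m → pvDiff items i < pvDiff items (i - 1))
    (hflat : ∀ i, m < i → i < (items.length : Int) → pvDiff items m ≤ pvDiff items i) :
    ∀ (c : Nat) (k : Int), 2 ≤ k → k ≤ m + 1 → (m + 1 - k).toNat = c →
    (PySem.List.pyRange k (items.length : Int) 1).foldl (pvStepA items)
        (k - 1, some (pvDiff items (k - 1)))
      = (m, some (pvDiff items m)) := by
  intro c
  induction c with
  | zero =>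
    intro k hk2 hkm hc
    have : k = m + 1 := by omega
    subst this
    have : m + 1 - 1 = m := by ring
    rw [this]
    exact pv_foldA_flat items m hm1 hflat ((items.length : Int) - (m+1)).toNat (m+1) (by omega) rfl
  | succ c ih =>
    intro k hk2 hkm hc
    have hkm' : k ≤ m := by omega
    have hkN : k < (items.length : Int) := by omega
    rw [PySem.List.pyRange_one_cons hkN, List.foldl_cons]
    rw [pv_stepA_eq items k _ (by omega) hkN]
    simp only
    rw [if_pos (hdec k hk2 hkm')]
    have := ih (k + 1) (by omega) (by omega) (by omega)
    rw [show k + 1 - 1 = k by ring] at this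
    exact this

-- A's whole loop, for n ≥ 2: it lands on the split m with the V-shape properties
theorem pv_foldA (items : List String) (m : Int) (hm1 : 1 ≤ m)
    (hm2 : m < (items.length : Int)) (hN : 2 ≤ (items.length : Int))
    (hdec : ∀ i, 2 ≤ i → i ≤ m → pvDiff items i < pvDiff items (i - 1))
    (hflat : ∀ i, m < i → i < (items.length : Int) → pvDiff items m ≤ pvDiff items i) :
    (PySem.List.pyRange 1 (items.length : Int) 1).foldl (pvStepA items) (1, none)
      = (m, some (pvDiff items m)) := by
  rw [PySem.List.pyRange_one_cons (by omega), List.foldl_cons]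
  rw [pv_stepA_eq items 1 _ (by omega) (by omega)]
  simp only
  have := pv_foldA_desc items m hm1 hm2 hdec hflat (m + 1 - 2).toNat 2 (by omega) (by omega) (by omega)
  rw [show (2:Int) - 1 = 1 by ring] at this
  exact this

-- B's while loop: invariant and exit condition
theorem pv_whileB (items : List String) (S : Int) :
    ∀ (fuel : Nat) (j left : Int), 1 ≤ j → j ≤ (items.length : Int) - 1 →
    left = pvLeft (items.map PySem.Str.len) j →
    (∀ i, 1 ≤ i → i < j → 2 * pvLeft (items.map PySem.Str.len) i < S) →
    (((items.length : Int) - 1 - j).toNat ≤ fuel) →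
    let r := pvWhileB (items.map PySem.Str.len) S (items.length : Int) fuel j left
    r.2 = pvLeft (items.map PySem.Str.len) r.1 ∧ 1 ≤ r.1 ∧ r.1 ≤ (items.length : Int) - 1 ∧
      (∀ i, 1 ≤ i → i < r.1 → 2 * pvLeft (items.map PySem.Str.len) i < S) ∧
      (S ≤ 2 * pvLeft (items.map PySem.Str.len) r.1 ∨ r.1 = (items.length : Int) - 1) := by
  intro fuel
  induction fuel with
  | zero =>
    intro j left h1 h2 hl hinv hf
    have : j = (items.length : Int) - 1 := by omega
    exact ⟨by simpa [pvWhileB] using hl, by simpa [pvWhileB] using h1,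
      by simpa [pvWhileB] using h2, by simpa [pvWhileB] using hinv, Or.inr (by simpa [pvWhileB] using this)⟩
  | succ fuel ih =>
    intro j left h1 h2 hl hinv hf
    by_cases hc : j < (items.length : Int) - 1 ∧ 2 * left < S
    · have hstep := pv_left_step (items.map PySem.Str.len) (j + 1) (by omega)
        (by simp only [List.length_map]; omega)
      rw [show j + 1 - 1 = j by ring, if_pos (by omega)] at hstep
      have hrec := ih (j + 1) (left + 3 + PySem.List.pyGetD (items.map PySem.Str.len) j 0)
        (by omega) (by omega)
        (by rw [hl]; omega)
        (by intro i hi1 hi2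
            by_cases hij : i < j
            · exact hinv i hi1 hij
            · have : i = j := by omega
              subst this; rw [← hl]; exact hc.2)
        (by omega)
      simpa [pvWhileB, if_pos hc] using hrec
    · refine ⟨by simpa [pvWhileB, if_neg hc] using hl, by simpa [pvWhileB, if_neg hc] using h1,
        by simpa [pvWhileB, if_neg hc] using h2, by simpa [pvWhileB, if_neg hc] using hinv, ?_⟩
      simp only [pvWhileB, if_neg hc]
      rcases not_and_or.1 hc with h | h
      · exact Or.inr (by omega)
      · exact Or.inl (by rw [← hl]; omega)

-- V-shape, descending side: while the left half is short of half the text,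
-- moving the split right strictly decreases the imbalance
theorem pv_diff_neg_lt (items : List String) (i : Int) (h2 : 2 ≤ i)
    (hiN : i < (items.length : Int))
    (hneg : 2 * pvLeft (pvLens items) i < pvS items) :
    pvDiff items i < pvDiff items (i - 1) := by
  have hmono := pv_left_mono items (i - 1) i (by omega) (by omega) hiN
  simp only [pvDiff, pvLens, pvS] at hneg ⊢
  rw [abs_of_neg (by omega), abs_of_neg (by omega)]
  omega

-- V-shape, ascending side: once the left half has reached half the text,
-- moving the split further right only increases the imbalance
theorem pv_diff_pos_le (items : List String) (m i : Int) (hm1 : 1 ≤ m)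
    (hpos : pvS items ≤ 2 * pvLeft (pvLens items) m)
    (hmi : m < i) (hiN : i < (items.length : Int)) :
    pvDiff items m ≤ pvDiff items i := by
  have hmono := pv_left_mono items m i (by omega) (by omega) hiN
  simp only [pvDiff, pvLens, pvS] at hpos ⊢
  rw [abs_of_nonneg (by omega), abs_of_nonneg (by omega)]
  omega

-- ===== VERDICT (by name: the statement is the Claim_ definition above) =====
theorem balance_contact_lines_py_spec : Claim_equal_balance_contact_lines_py := by
  unfold Claim_equal_balance_contact_lines_py
  intro items _
  unfold Spec_balance_contact_lines_py
  by_cases hnil : items = []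
  · simp [balance_contact_lines_py, balance_contact_lines_py_alt, hnil]
  · have hjoin := pv_joinLen items hnil
    simp only [balance_contact_lines_py, balance_contact_lines_py_alt, if_neg hnil]
    rw [hjoin]
    by_cases hle : (items.map PySem.Str.len).sum + 3 * ((items.length : Int) - 1) ≤ 80
    · simp [hle]
    · simp only [if_neg hle]
      by_cases hN : (items.length : Int) < 2
      · -- single item longer than the limit: both versions split at 1
        have hlen1 : items.length = 1 := by
          rcases items with _ | ⟨s, t⟩
          · exact absurd rfl hnil
          · simp at hN ⊢; omega
        simp [hlen1, pvWhileB, PySem.List.pyRange_one_eq_nil]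
      · -- n ≥ 2: characterize B's while loop, then A's fold
        have hL1 : pvLeft (items.map PySem.Str.len) 1
            = PySem.List.pyGetD (items.map PySem.Str.len) 0 0 := by
          have := pv_left_step (items.map PySem.Str.len) 1 (by omega)
            (by simp only [List.length_map]; omega)
          simp only [pvLeft] at this ⊢
          norm_num at this ⊢
          omega
        set Sv := (List.map PySem.Str.len items).sum + 3 * ((items.length : Int) - 1) - 3 with hSv
        have hW := pv_whileB items Sv
          items.length 1 (PySem.List.pyGetD (items.map PySem.Str.len) 0 0)
          (by omega) (by omega) hL1.symm (by omega) (by omega)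
        simp only at hW
        obtain ⟨hr2, hr1, hrN, hinv, hexit⟩ := hW
        have hDrw : ∀ k : Int, |2 * pvLeft (List.map PySem.Str.len items) k - Sv|
            = pvDiff items k := by
          intro k; rw [hSv]; simp only [pvDiff, pvLens, pvS]
        set R := pvWhileB (List.map PySem.Str.len items) Sv ((items.length : Int))
          items.length 1 (PySem.List.pyGetD (List.map PySem.Str.len items) 0 0) with hRdef
        clear_value R
        obtain ⟨j0, l0⟩ := R
        simp only at hr2 hr1 hrN hinv hexit ⊢
        have hinv' : ∀ i, 1 ≤ i → i < j0 → 2 * pvLeft (pvLens items) i < pvS items := by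
          intro i h1 h2
          have := hinv i h1 h2
          simp only [pvLens, pvS, ← hSv]
          exact this
        have hpos' : pvS items ≤ 2 * pvLeft (pvLens items) j0 ∨ j0 = (items.length : Int) - 1 := by
          rcases hexit with hp | hp
          · left; simp only [pvLens, pvS, ← hSv]; exact hp
          · right; exact hp
        by_cases hj1 : 1 < j0
        · rw [if_pos hj1, hr2]
          have hprev : pvLeft (List.map PySem.Str.len items) j0 - 3
              - PySem.List.pyGetD (List.map PySem.Str.len items) (j0 - 1) 0
              = pvLeft (List.map PySem.Str.len items) (j0 - 1) := by
            have hs := pv_left_step (List.map PySem.Str.len items) j0 (by omega)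
              (by simp only [List.length_map]; omega)
            rw [if_pos hj1] at hs
            omega
          rw [hprev]
          simp only [hDrw]
          by_cases hcond : pvDiff items (j0 - 1) ≤ pvDiff items j0
          · rw [if_pos hcond]
            have hfold := pv_foldA items (j0 - 1) (by omega) (by omega) (by omega)
              (fun i h2 hi => pv_diff_neg_lt items i h2 (by omega)
                (hinv' i (by omega) (by omega)))
              (by
                intro i hmi hiN2
                by_cases hij : i = j0
                · subst hij; exact hcond
                · rcases hpos' with hp | hp
                  · exact le_trans hcond (pv_diff_pos_le items j0 i (by omega) hp
                      (by omega) (by omega))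
                  · omega)
            rw [hfold]
          · rw [if_neg hcond]
            have hfold := pv_foldA items j0 (by omega) (by omega) (by omega)
              (by
                intro i h2 hi
                by_cases hij : i = j0
                · subst hij; omega
                · exact pv_diff_neg_lt items i h2 (by omega) (hinv' i (by omega) (by omega)))
              (by
                intro i hmi hiN2
                rcases hpos' with hp | hp
                · exact pv_diff_pos_le items j0 i (by omega) hp hmi (by omega)
                · omega)
            rw [hfold]
        · rw [if_neg hj1]
          have hfold := pv_foldA items j0 (by omega) (by omega) (by omega)
            (by intro i h2 hi; omega)
            (by
              intro i hmi hiN2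
              rcases hpos' with hp | hp
              · exact pv_diff_pos_le items j0 i (by omega) hp hmi (by omega)
              · omega)
          rw [hfold]
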